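-- pv_equiv track=rewrite | github.com/joelhealy/lc101 | unit1/Chapter 09 - Strings/Chapter 09 - Studio 7 - Sorted - Bonus Mission 2.py | move_consonants_to_end
-- ===== SOURCE A (Python) =====
-- def move_consonants_to_end(string):
--     consonants = 'bcdfghjklmnpqrstvwxz'
--     init_consonants = ''
--     for char in string:
--         if char in consonants:
--             init_consonants += char
--         else:
--             break
--     return string[len(init_consonants):] + init_consonants
-- ===== SOURCE B (Python) =====
-- def move_consonants_to_end(string):
--     consonants = 'bcdfghjklmnpqrstvwxz'
--     s = string
--     for _ in range(len(string)):
--         if s and s[0] in consonants: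
--             s = s[1:] + s[0]
--         else:
--             break
--     return s
-- ===== Notes on version B (the rewrite author's own statement) =====
-- stated objective: alternative
-- what changed: Instead of accumulating the leading consonant run and concatenating the two slices, B repeatedly rotates the string left by one character while its head is a consonant (bounded by len(string)), so the answer emerges from successive one-step rotations with no split point ever computed.
import Mathlib
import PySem

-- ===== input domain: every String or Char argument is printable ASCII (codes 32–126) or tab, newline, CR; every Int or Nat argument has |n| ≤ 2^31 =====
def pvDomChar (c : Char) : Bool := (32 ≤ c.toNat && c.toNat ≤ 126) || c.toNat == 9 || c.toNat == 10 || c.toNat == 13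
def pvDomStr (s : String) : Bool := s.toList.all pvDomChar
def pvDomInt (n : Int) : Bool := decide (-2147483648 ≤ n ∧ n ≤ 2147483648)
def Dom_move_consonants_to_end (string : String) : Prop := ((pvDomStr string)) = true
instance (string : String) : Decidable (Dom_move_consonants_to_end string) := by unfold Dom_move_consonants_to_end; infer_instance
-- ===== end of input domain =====

-- B replaces A's accumulate-prefix-and-slice approach by repeated one-character left rotations while the head is a consonant (alternative decomposition; same result).


-- ===== PORT A =====
def pvConsonantsA : List Char := "bcdfghjklmnpqrstvwxz".toList

-- the 'for char in string: if char in consonants: init_consonants += char else: break' loop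
def pvALoop (cs : List Char) (acc : List Char) : List Char :=
  match cs with
  | [] => acc
  | c :: rest => if pvConsonantsA.contains c then pvALoop rest (acc ++ [c]) else acc

def move_consonants_to_end (string : String) : String :=
  let init_consonants := pvALoop string.toList []
  String.ofList (PySem.List.slice string.toList (some (init_consonants.length : Int)) none ++ init_consonants)

-- ===== PORT B =====
def pvConsonantsB : List Char := "bcdfghjklmnpqrstvwxz".toList

-- the 'for _ in range(len(string)): if s and s[0] in consonants: s = s[1:] + s[0] else: break' loop
def pvBLoop (fuel : Nat) (s : List Char) : List Char :=
  match fuel with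
  | 0 => s
  | f + 1 =>
    match s with
    | [] => s                       -- 'if s and …' false → break
    | c :: rest =>
      if pvConsonantsB.contains c then pvBLoop f (rest ++ [c]) else s

def move_consonants_to_end_alt (string : String) : String :=
  String.ofList (pvBLoop string.toList.length string.toList)

-- ===== PRECONDITION & SPEC =====
def Spec_move_consonants_to_end (string : String) (out : String) : Prop := out = move_consonants_to_end_alt string
instance (string : String) (out : String) : Decidable (Spec_move_consonants_to_end string out) := by unfold Spec_move_consonants_to_end; infer_instance

-- ===== CLAIM (what is proved, stated in full; the proofs are below) =====
def Claim_equal_move_consonants_to_end : Prop := ∀ (string : String), Dom_move_consonants_to_end string → Spec_move_consonants_to_end string (move_consonants_to_end string)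

-- ===== LEMMAS AND PROOFS =====
theorem pvALoop_eq (cs acc : List Char) :
    pvALoop cs acc = acc ++ cs.takeWhile pvConsonantsA.contains := by
  induction cs generalizing acc with
  | nil => simp [pvALoop]
  | cons c rest ih =>
    by_cases h : c ∈ pvConsonantsA
    · simp [pvALoop, h, ih]
    · simp [pvALoop, h]

theorem drop_len_takeWhile (p : Char → Bool) (l : List Char) :
    l.drop (l.takeWhile p).length = l.dropWhile p :=
  calc l.drop (l.takeWhile p).length
      = ((l.takeWhile p) ++ (l.dropWhile p)).drop (l.takeWhile p).length := by
        rw [List.takeWhile_append_dropWhile]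
    _ = l.dropWhile p := List.drop_left

-- the rotation loop, run with fuel = length of the yet-unvisited part, peels off the
-- consonant prefix of that part and appends it behind the accumulated suffix
theorem pvBLoop_inv (rest pref : List Char) :
    pvBLoop rest.length (rest ++ pref)
      = rest.dropWhile pvConsonantsB.contains ++ pref ++ rest.takeWhile pvConsonantsB.contains := by
  induction rest generalizing pref with
  | nil => simp [pvBLoop]
  | cons c r ih =>
    by_cases h : c ∈ pvConsonantsB
    · have hb : pvConsonantsB.contains c = true := by simpa using h
      simp only [List.length_cons, pvBLoop, List.cons_append, hb, if_true,
        List.takeWhile_cons, List.dropWhile_cons]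
      rw [List.append_assoc r pref [c], ih]
      simp
    · have hb : pvConsonantsB.contains c = false := by simpa using h
      simp [pvBLoop, h]

-- ===== VERDICT (by name: the statement is the Claim_ definition above) =====
theorem move_consonants_to_end_spec : Claim_equal_move_consonants_to_end := by
  intro s _
  unfold Spec_move_consonants_to_end move_consonants_to_end move_consonants_to_end_alt
  simp only [pvALoop_eq, List.nil_append]
  set l := s.toList
  have hB := pvBLoop_inv l []
  simp only [List.append_nil] at hB
  rw [hB]
  have hc : pvConsonantsB = pvConsonantsA := rfl
  rw [hc]
  rw [PySem.List.slice_from l (by positivity), Int.toNat_natCast, drop_len_takeWhile]
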